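-- pv_equiv track=rewrite | github.com/criveracrum/Competitive-Programming | danceRecital.py | solve
-- ===== SOURCE A (Python) =====
-- from collections import Counter
--
-- def totalCost(row):
--     res = 0
--     for i in range(len(row)-1):
--         res+=sum((Counter(row[i]) & Counter(row[i+1])).values())
--     return res
--
-- def solve(used, k, r):
--     if (k==r):
--         return totalCost(used)
--
--     res = 1000000
--
--     for i in range(k, r+1):
--        used[k], used[i] = used[i], used[k]
--        res = min (res, solve(used, k+1, r))
--        used[k], used[i] = used[i], used[k]
--     return res
-- ===== SOURCE B (Python) =====
-- from collections import Counter
--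
--
-- def _pair(a, b):
--     return sum((Counter(a) & Counter(b)).values())
--
--
-- def _adj(rows):
--     return sum(_pair(a, b) for a, b in zip(rows, rows[1:]))
--
--
-- def solve(used, k, r):
--     if k == r:
--         return _adj(used)
--     pre = used[:k]
--     seg = used[k:r + 1]
--     suf = used[r + 1:]
--     fixed = _adj(pre) + _adj(suf)
--
--     def best(last, rem):
--         # cheapest cost of laying out all rows of rem directly after row `last`,
--         # including the junction to the fixed suffix (if any)
--         if not rem:
--             return _pair(last, suf[0]) if suf else 0
--         return min(_pair(last, rem[j]) + best(rem[j], rem[:j] + rem[j + 1:])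
--                    for j in range(len(rem)))
--
--     res = 1000000
--     for j in range(len(seg)):
--         start = _pair(pre[-1], seg[j]) if pre else 0
--         res = min(res, fixed + start + best(seg[j], seg[:j] + seg[j + 1:]))
--     return res
-- ===== Notes on version B (the rewrite author's own statement) =====
-- stated objective: alternative
-- what changed: A permutes positions k..r of the shared list in place by swap/recurse/swap-back and re-runs the Counter-based total cost of the WHOLE list at every complete permutation; B slices the list once into prefix/segment/suffix, precomputes the fixed prefix/suffix cost, and minimizes by a functional selection recursion over the remaining rows that accumulates only the pairwise junction costs incrementally (never rebuilding an arrangement or rescanning the fixed parts).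
-- outside the precondition, e.g. on solve(['ba', 'bca'], 0, -2): A returns 1000000, B returns 2; on solve(['abc', 'b', 'a', 'ca'], -2, 2): A returns 1, B returns 2; on solve(['a', 'b', 'c'], 1, 5): A raises IndexError, B returns 0
import Mathlib
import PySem

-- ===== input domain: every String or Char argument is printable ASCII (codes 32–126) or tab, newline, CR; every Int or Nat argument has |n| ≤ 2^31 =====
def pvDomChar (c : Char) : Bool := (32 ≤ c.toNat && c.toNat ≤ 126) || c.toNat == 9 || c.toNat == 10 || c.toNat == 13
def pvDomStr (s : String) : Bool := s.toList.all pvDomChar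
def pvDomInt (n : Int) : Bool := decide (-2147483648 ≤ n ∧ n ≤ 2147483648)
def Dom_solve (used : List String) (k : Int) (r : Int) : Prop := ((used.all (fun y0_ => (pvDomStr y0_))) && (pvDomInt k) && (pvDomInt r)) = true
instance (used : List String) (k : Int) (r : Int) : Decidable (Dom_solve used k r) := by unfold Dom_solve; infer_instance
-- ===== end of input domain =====

-- B is an alternative algorithm: A permutes positions k..r of the list in place and re-scores the
-- whole list with Counters at each complete permutation; B slices once into prefix/segment/suffix,
-- scores the fixed parts once, and minimizes by a selection recursion accumulating junction costs.
-- A swaps elements of `used` in place but always restores them before returning; the equivalence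
-- proved here is about the return value (A's net mutation is nil on every input it returns on).

-- ===== PORT A =====
-- sum((Counter(a) & Counter(b)).values()) , hand-ported: Counter(a) & Counter(b) keeps the distinct
-- chars of a (first-occurrence order) with value min(count_a, count_b) where that min is positive;
-- summing the values equals summing min(count_a c, count_b c) over the distinct chars of a, since
-- chars dropped by & contribute a zero min.  Exact; shared by both ports (both Pythons contain this
-- same expression).
def pairCost (a b : String) : Int :=
  ((PySem.Set.ofList a.toList).map
    (fun c => ((min (a.toList.count c) (b.toList.count c) : Nat) : Int))).sum

-- totalCost(row): for i in range(len(row)-1): res += pair(row[i], row[i+1]).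
-- Indices i, i+1 are always in range, so row.getD is exact here.
def totalCost (row : List String) : Int :=
  (List.range (row.length - 1)).foldl
    (fun res i => res + pairCost (row.getD i "") (row.getD (i + 1) "")) 0

-- `used[k], used[i] = used[i], used[k]` — none = IndexError (excluded by Pre_solve)
def pySwap (l : List String) (k i : Int) : Option (List String) :=
  match PySem.List.pyGet? l i, PySem.List.pyGet? l k with
  | some a, some b => some (PySem.List.pySetD (PySem.List.pySetD l k a) i b)
  | _, _ => none

mutual
-- the `for i in range(k, r+1)` loop of A; `k ≤ i` is the range invariant (every emitted i
-- satisfies it), carried in the guard only so that the recursion is well-founded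
def solveLoop (used : List String) (k r i res : Int) : Int :=
  if _h : k ≤ i ∧ i < r + 1 then
    match pySwap used k i with
    | none => 0  -- Python raises IndexError here (outside Pre_solve)
    | some u =>
      let res' := min res (solve u (k + 1) r)
      match pySwap u k i with
      | none => 0  -- unreachable: the first swap succeeded
      | some u2 => solveLoop u2 k r (i + 1) res'
  else res
termination_by ((r + 1 - k).toNat, 0, (r + 1 - i).toNat)

def solve (used : List String) (k : Int) (r : Int) : Int :=
  if k = r then totalCost used
  else solveLoop used k r k 1000000
termination_by ((r + 1 - k).toNat, 1, 0)
end

-- ===== PORT B =====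
-- sum(_pair(a, b) for a, b in zip(rows, rows[1:]))
def adjSum (rows : List String) : Int :=
  (rows.zip rows.tail).foldl (fun acc p => acc + pairCost p.1 p.2) 0

-- Python min() of a nonempty list ([] is unreachable in B: Python raises ValueError there)
def pyMin : List Int → Int
  | [] => 0
  | v :: vs => vs.foldl min v

-- best(last, rem) of Source B; rem[:j] + rem[j+1:] = rem.take j ++ rem.drop (j+1) for 0 ≤ j < len(rem)
def bestB (suf : List String) (last : String) (rem : List String) : Int :=
  if rem = [] then
    match suf with
    | [] => 0
    | s0 :: _ => pairCost last s0
  else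
    pyMin ((List.range rem.length).attach.map
      (fun j => pairCost last (rem.getD j.1 "") +
        bestB suf (rem.getD j.1 "") (rem.take j.1 ++ rem.drop (j.1 + 1))))
termination_by rem.length
decreasing_by
  have := List.mem_range.mp j.2
  simp only [List.length_append, List.length_take, List.length_drop]
  omega

def solve_alt (used : List String) (k : Int) (r : Int) : Int :=
  if k = r then adjSum used
  else
    let pre := PySem.List.slice used none (some k)
    let seg := PySem.List.slice used (some k) (some (r + 1))
    let suf := PySem.List.slice used (some (r + 1)) none
    let fixed := adjSum pre + adjSum suf
    (List.range seg.length).foldl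
      (fun res j =>
        let start := if pre = [] then 0 else pairCost (pre.getLast?.getD "") (seg.getD j "")
        min res (fixed + start + bestB suf (seg.getD j "") (seg.take j ++ seg.drop (j + 1))))
      1000000

-- ===== PRECONDITION & SPEC =====
-- Pre_ restricts to the natural domain of the permutation recursion: k = r (A scores the list as
-- is), 0 ≤ k ≤ r < len(used) (the intended calls), or an empty range k > r whose slice used[k:r+1]
-- is also empty (A returns its 1000000 sentinel and B agrees).  Outside it A raises IndexError or
-- returns accidental values via Python negative-index wraparound (negative k with k < r, or k > r
-- where used[k:r+1] is nonempty under Python's slice rules although A's loop range is empty).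
def Pre_solve (used : List String) (k : Int) (r : Int) : Prop :=
  k = r ∨ (0 ≤ k ∧ k ≤ r ∧ r < (used.length : Int)) ∨
    (r < k ∧ PySem.List.clampIdx used.length (r + 1) ≤ PySem.List.clampIdx used.length k)
instance (used : List String) (k : Int) (r : Int) : Decidable (Pre_solve used k r) := by
  unfold Pre_solve; infer_instance

def pvWitness_solve : List String × Int × Int := (["ab", "bc", "ca"], 0, 2)

def Spec_solve (used : List String) (k : Int) (r : Int) (out : Int) : Prop := out = solve_alt used k r
instance (used : List String) (k : Int) (r : Int) (out : Int) : Decidable (Spec_solve used k r out) := by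
  unfold Spec_solve; infer_instance

-- ===== CLAIM (what is proved, stated in full; the proofs are below) =====
def Claim_equal_solve : Prop := ∀ (used : List String) (k : Int) (r : Int), Dom_solve used k r → Pre_solve used k r → Spec_solve used k r (solve used k r)

-- ===== LEMMAS AND PROOFS =====

-- recursive adjacency sum, the common reasoning form of totalCost / adjSum
def adjR : List String → Int
  | [] => 0
  | [_] => 0
  | a :: b :: t => pairCost a b + adjR (b :: t)

-- junction between a (possibly empty) prefix and the row following it
def lastJ (xs : List String) (h : String) : Int :=
  match xs.getLast? with
  | none => 0
  | some x => pairCost x h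

-- cost of the path last :: q including the junction into the fixed suffix (bestB's value shape)
def chainC (suf : List String) (last : String) : List String → Int
  | [] => match suf with
          | [] => 0
          | s0 :: _ => pairCost last s0
  | x :: q => pairCost last x + chainC suf x q

-- the common specification: min(1000000, min over permutations p of seg of adjR (pre ++ p ++ suf))
def canon (pre seg suf : List String) : Int :=
  ((seg.permutations.map (fun p => adjR (pre ++ p ++ suf)))).foldl min 1000000

-- total swap function used by the proofs (equal to pySwap on in-range indices)
def swpd (l : List String) (k i : Int) : List String :=
  (l.set k.toNat (l.getD i.toNat "")).set i.toNat (l.getD k.toNat "")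

theorem foldlmin_eq_of_dom (a : Int) (xs ys : List Int)
    (h1 : ∀ v, (v = a ∨ v ∈ xs) → ∃ w, (w = a ∨ w ∈ ys) ∧ w ≤ v)
    (h2 : ∀ v, (v = a ∨ v ∈ ys) → ∃ w, (w = a ∨ w ∈ xs) ∧ w ≤ v) :
    xs.foldl min a = ys.foldl min a := by
  have hmx := PySem.List.foldl_min_mem xs a
  have hmy := PySem.List.foldl_min_mem ys a
  have hlx := PySem.List.foldl_min_le xs a
  have hly := PySem.List.foldl_min_le ys a
  have d1 : ys.foldl min a ≤ xs.foldl min a := by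
    rcases h1 _ hmx with ⟨w, hw, hwle⟩
    rcases hw with rfl | hw
    · exact le_trans hly.1 hwle
    · exact le_trans (hly.2 w hw) hwle
  have d2 : xs.foldl min a ≤ ys.foldl min a := by
    rcases h2 _ hmy with ⟨w, hw, hwle⟩
    rcases hw with rfl | hw
    · exact le_trans hlx.1 hwle
    · exact le_trans (hlx.2 w hw) hwle
  exact le_antisymm d2 d1

theorem pyMin_le_mem (xs : List Int) (x : Int) (hx : x ∈ xs) : pyMin xs ≤ x := by
  cases xs with
  | nil => cases hx
  | cons v vs =>
    rcases List.mem_cons.mp hx with rfl | hx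
    · exact (PySem.List.foldl_min_le vs x).1
    · exact (PySem.List.foldl_min_le vs v).2 x hx

theorem pyMin_mem (xs : List Int) (h : xs ≠ []) : pyMin xs ∈ xs := by
  cases xs with
  | nil => exact absurd rfl h
  | cons v vs =>
    rcases PySem.List.foldl_min_mem vs v with h' | h'
    · simp [pyMin, h']
    · exact List.mem_cons_of_mem v h'

theorem pyMin_eq_of_dom (xs ys : List Int) (hx : xs ≠ []) (hy : ys ≠ [])
    (h1 : ∀ v ∈ xs, ∃ w ∈ ys, w ≤ v) (h2 : ∀ v ∈ ys, ∃ w ∈ xs, w ≤ v) :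
    pyMin xs = pyMin ys := by
  rcases h1 _ (pyMin_mem xs hx) with ⟨w, hw, hwle⟩
  rcases h2 _ (pyMin_mem ys hy) with ⟨w', hw', hwle'⟩
  exact le_antisymm (le_trans (pyMin_le_mem xs w' hw') hwle')
    (le_trans (pyMin_le_mem ys w hw) hwle)

theorem consSet_perm {α : Type} (t : List α) (m : Nat) (hm : m < t.length) (x : α) :
    (t[m] :: t.set m x).Perm (x :: t) := by
  induction t generalizing m with
  | nil => cases hm
  | cons a s ih =>
    cases m with
    | zero => simpa using List.Perm.swap x a s
    | succ m =>
      have hm' : m < s.length := by simpa using hm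
      simp only [List.getElem_cons_succ, List.set_cons_succ]
      exact ((List.Perm.swap a s[m] _).trans ((ih m hm').cons a)).trans (List.Perm.swap x a s)

theorem setSet_perm {α : Type} (l : List α) (i j : Nat) (hi : i < l.length) (hj : j < l.length) :
    ((l.set i l[j]).set j l[i]).Perm l := by
  induction l generalizing i j with
  | nil => cases hi
  | cons a t ih =>
    cases i with
    | zero =>
      cases j with
      | zero => simp
      | succ m =>
        have hm : m < t.length := by simpa using hj
        simp only [List.getElem_cons_succ, List.getElem_cons_zero, List.set_cons_zero,
          List.set_cons_succ]
        exact consSet_perm t m hm a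
    | succ n =>
      cases j with
      | zero =>
        have hn : n < t.length := by simpa using hi
        simp only [List.getElem_cons_succ, List.getElem_cons_zero, List.set_cons_zero,
          List.set_cons_succ]
        exact consSet_perm t n hn a
      | succ m =>
        have hn : n < t.length := by simpa using hi
        have hm : m < t.length := by simpa using hj
        simp only [List.getElem_cons_succ, List.set_cons_succ]
        exact (ih n m hn hm).cons a

theorem perm_cons_take_drop {α : Type} [Inhabited α] (l : List α) (j : Nat) (hj : j < l.length) (d : α) :
    l.Perm (l.getD j d :: (l.take j ++ l.drop (j + 1))) := by
  have hget : l.getD j d = l[j] := List.getD_eq_getElem l d hj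
  have hdec : l = l.take j ++ l[j] :: l.drop (j + 1) := by
    conv_lhs => rw [← List.take_append_drop j l]
    rw [List.drop_eq_getElem_cons hj]
  rw [hget]
  conv_lhs => rw [hdec]
  exact List.perm_middle

theorem perms_decomp (seg p : List String) (hne : seg ≠ []) (hp : p.Perm seg) :
    ∃ j, j < seg.length ∧ ∃ q, p = seg.getD j "" :: q ∧ q.Perm (seg.take j ++ seg.drop (j + 1)) := by
  cases p with
  | nil =>
    have := hp.length_eq
    simp at this
    exact absurd this.symm (by simpa using List.length_pos_of_ne_nil (by exact hne) |>.ne')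
  | cons h q =>
    have hmem : h ∈ seg := hp.subset (List.mem_cons_self)
    rcases List.getElem_of_mem hmem with ⟨j, hj, hjv⟩
    refine ⟨j, hj, q, ?_, ?_⟩
    · rw [List.getD_eq_getElem seg "" hj, hjv]
    · -- q ~ seg.erase h ~ take ++ drop
      have h1 : q.Perm (seg.erase h) := (List.cons_perm_iff_perm_erase.mp hp).2
      have h2 : seg.Perm (seg.getD j "" :: (seg.take j ++ seg.drop (j+1))) :=
        perm_cons_take_drop seg j hj ""
      rw [List.getD_eq_getElem seg "" hj, hjv] at h2
      have h3 : (seg.take j ++ seg.drop (j+1)).Perm (seg.erase h) :=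
        (List.cons_perm_iff_perm_erase.mp h2.symm).2
      exact h1.trans h3.symm

theorem foldl_add_eq {α : Type} (g : α → Int) (xs : List α) : ∀ (c : Int),
    xs.foldl (fun acc x => acc + g x) c = c + (xs.map g).sum := by
  induction xs with
  | nil => intro c; simp
  | cons x t ih => intro c; simp only [List.foldl_cons, ih, List.map_cons, List.sum_cons]; ring

theorem totalCost_sum (m : List String) : totalCost m =
    ((List.range (m.length - 1)).map (fun i => pairCost (m.getD i "") (m.getD (i + 1) ""))).sum := by
  rw [totalCost, foldl_add_eq]; simp

theorem totalCost_eq_adjR (l : List String) : totalCost l = adjR l := by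
  induction l using adjR.induct with
  | case1 => simp [totalCost_sum, adjR]
  | case2 a => simp [totalCost_sum, adjR]
  | case3 a b t ih =>
    rw [totalCost_sum] at ih ⊢
    simp only [List.length_cons]
    rw [show (t.length + 1 + 1 - 1) = t.length + 1 from rfl, List.range_succ_eq_map]
    simp only [List.map_cons, List.map_map, List.sum_cons]
    rw [show adjR (a :: b :: t) = pairCost a b + adjR (b :: t) from by simp [adjR]]
    simp only [List.getD_cons_zero, List.getD_cons_succ]
    rw [← ih]
    simp only [List.length_cons, Nat.add_sub_cancel]
    congr 1

theorem adjSum_eq_adjR (l : List String) : adjSum l = adjR l := by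
  induction l using adjR.induct with
  | case1 => simp [adjSum, adjR]
  | case2 a => simp [adjSum, adjR]
  | case3 a b t ih =>
    rw [adjSum, foldl_add_eq] at ih ⊢
    simp only [List.tail_cons, List.zip_cons_cons, List.map_cons, List.sum_cons] at ih ⊢
    rw [show adjR (a :: b :: t) = pairCost a b + adjR (b :: t) from by simp [adjR], ← ih]
    simp

theorem adjR_append (xs : List String) (h : String) (rest : List String) :
    adjR (xs ++ h :: rest) = adjR xs + lastJ xs h + adjR (h :: rest) := by
  induction xs using adjR.induct with
  | case1 => simp [adjR, lastJ]
  | case2 a => simp [adjR, lastJ]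
  | case3 a b t ih =>
    have e1 : (a :: b :: t) ++ h :: rest = a :: b :: (t ++ h :: rest) := by simp
    rw [e1, show adjR (a :: b :: (t ++ h :: rest))
        = pairCost a b + adjR (b :: (t ++ h :: rest)) from by simp [adjR],
      show (b :: (t ++ h :: rest)) = (b :: t) ++ h :: rest from by simp, ih,
      show adjR (a :: b :: t) = pairCost a b + adjR (b :: t) from by simp [adjR],
      show lastJ (a :: b :: t) h = lastJ (b :: t) h from by simp [lastJ]]
    ring

theorem chainC_eq (suf : List String) (q : List String) (last : String) :
    adjR ((last :: q) ++ suf) = chainC suf last q + adjR suf := by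
  induction q generalizing last with
  | nil =>
    cases suf with
    | nil => simp [adjR, chainC]
    | cons s0 s' => simp only [List.nil_append, List.cons_append, chainC]
                    simp [adjR]
  | cons x q' ih =>
    rw [show (last :: x :: q') ++ suf = last :: ((x :: q') ++ suf) from by simp,
      show adjR (last :: ((x :: q') ++ suf)) = pairCost last x + adjR ((x :: q') ++ suf) from by
        simp [adjR], ih x, chainC]
    ring

-- A's value of an arrangement pre ++ (h :: q) ++ suf, split the way B computes it
theorem adjR_split (pre suf : List String) (h : String) (q : List String) :
    adjR (pre ++ (h :: q) ++ suf) = adjR pre + adjR suf + lastJ pre h + chainC suf h q := by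
  rw [show pre ++ (h :: q) ++ suf = pre ++ (h :: (q ++ suf)) from by simp,
    adjR_append pre h (q ++ suf),
    show (h :: (q ++ suf)) = (h :: q) ++ suf from by simp, chainC_eq]
  ring

theorem permutations_ne_nil {α : Type} (l : List α) : l.permutations ≠ [] := by
  intro h
  have : l ∈ l.permutations := List.mem_permutations.mpr (List.Perm.refl l)
  rw [h] at this
  cases this

theorem best_char : ∀ (n : Nat) (suf rem : List String) (last : String), rem.length = n →
    bestB suf last rem = pyMin (rem.permutations.map (chainC suf last)) := by
  intro n
  induction n using Nat.strong_induction_on with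
  | _ n IH =>
  intro suf rem last hlen
  by_cases hrem : rem = []
  · subst hrem
    rw [bestB.eq_def]
    simp only [reduceIte, List.permutations_nil, List.map_cons, List.map_nil]
    cases suf <;> simp [pyMin, chainC]
  · rw [bestB.eq_def, if_neg hrem]
    have hm : 0 < rem.length := List.length_pos_of_ne_nil hrem
    have hlenE : ∀ j, j < rem.length → (rem.take j ++ rem.drop (j + 1)).length = rem.length - 1 := by
      intro j hj; simp only [List.length_append, List.length_take, List.length_drop]; omega
    have hIH : ∀ j, j < rem.length →
        bestB suf (rem.getD j "") (rem.take j ++ rem.drop (j + 1)) =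
          pyMin ((rem.take j ++ rem.drop (j + 1)).permutations.map (chainC suf (rem.getD j ""))) := by
      intro j hj
      exact IH (rem.length - 1) (by omega) suf _ (rem.getD j "") (hlenE j hj)
    apply pyMin_eq_of_dom
    · simp only [ne_eq, List.map_eq_nil_iff, List.attach_eq_nil_iff, List.range_eq_nil]
      omega
    · simp only [ne_eq, List.map_eq_nil_iff]
      exact permutations_ne_nil rem
    · intro v hv
      rcases List.mem_map.mp hv with ⟨⟨j, hjr⟩, _, rfl⟩
      have hj : j < rem.length := List.mem_range.mp hjr
      rw [hIH j hj]
      have hperm_ne : ((rem.take j ++ rem.drop (j + 1)).permutations.map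
          (chainC suf (rem.getD j ""))) ≠ [] := by
        simp only [ne_eq, List.map_eq_nil_iff]; exact permutations_ne_nil _
      rcases List.mem_map.mp (pyMin_mem _ hperm_ne) with ⟨p', hp', hpv⟩
      refine ⟨chainC suf last (rem.getD j "" :: p'), ?_, ?_⟩
      · refine List.mem_map.mpr ⟨rem.getD j "" :: p', ?_, rfl⟩
        refine List.mem_permutations.mpr ?_
        exact ((List.mem_permutations.mp hp').cons _).trans (perm_cons_take_drop rem j hj "").symm
      · rw [show chainC suf last (rem.getD j "" :: p')
            = pairCost last (rem.getD j "") + chainC suf (rem.getD j "") p' from rfl, ← hpv]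
    · intro v hv
      rcases List.mem_map.mp hv with ⟨p, hp, rfl⟩
      rcases perms_decomp rem p hrem (List.mem_permutations.mp hp) with ⟨j, hj, q, rfl, hq⟩
      refine ⟨pairCost last (rem.getD j "") +
        bestB suf (rem.getD j "") (rem.take j ++ rem.drop (j + 1)), ?_, ?_⟩
      · exact List.mem_map.mpr ⟨⟨j, List.mem_range.mpr hj⟩, List.mem_attach _ _, rfl⟩
      · rw [hIH j hj, show chainC suf last (rem.getD j "" :: q)
            = pairCost last (rem.getD j "") + chainC suf (rem.getD j "") q from rfl]
        have : chainC suf (rem.getD j "") q ∈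
            ((rem.take j ++ rem.drop (j + 1)).permutations.map (chainC suf (rem.getD j ""))) :=
          List.mem_map.mpr ⟨q, List.mem_permutations.mpr hq, rfl⟩
        exact Int.add_le_add_left (pyMin_le_mem _ _ this) _

theorem startJ_eq (xs : List String) (h : String) :
    (if xs = [] then 0 else pairCost (xs.getLast?.getD "") h) = lastJ xs h := by
  cases hx : xs.getLast? with
  | none => rw [List.getLast?_eq_none_iff.mp hx]; simp [lastJ]
  | some x =>
    have hne : xs ≠ [] := by
      intro hh; rw [hh] at hx; simp at hx
    simp [lastJ, hx, hne]

theorem best_char' (suf rem : List String) (last : String) :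
    bestB suf last rem = pyMin (rem.permutations.map (chainC suf last)) :=
  best_char rem.length suf rem last rfl

theorem Bchar (used : List String) (k r : Int) (h0 : 0 ≤ k) (hkr : k ≤ r)
    (hr : r < (used.length : Int)) (hne : k ≠ r) :
    solve_alt used k r =
      canon (used.take k.toNat) ((used.drop k.toNat).take (r.toNat + 1 - k.toNat))
        (used.drop (r.toNat + 1)) := by
  have hr1 : (r + 1).toNat = r.toNat + 1 := by omega
  set pre := used.take k.toNat with hpre
  set seg := (used.drop k.toNat).take (r.toNat + 1 - k.toNat) with hseg
  set suf := used.drop (r.toNat + 1) with hsuf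
  have hm : 0 < seg.length := by
    rw [hseg]
    simp only [List.length_take, List.length_drop]
    omega
  rw [solve_alt, if_neg hne, PySem.List.slice_to used h0,
    PySem.List.slice_toNat used h0 (by omega : (0:Int) ≤ r + 1),
    PySem.List.slice_from used (by omega : (0:Int) ≤ r + 1), hr1, ← hpre, ← hseg, ← hsuf]
  simp only [adjSum_eq_adjR, startJ_eq, best_char']
  rw [← List.foldl_map, canon]
  apply foldlmin_eq_of_dom
  · intro v hv
    rcases hv with rfl | hv
    · exact ⟨1000000, Or.inl rfl, le_refl _⟩
    rcases List.mem_map.mp hv with ⟨j, hjr, rfl⟩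
    have hj : j < seg.length := List.mem_range.mp hjr
    have hne' : ((seg.take j ++ seg.drop (j + 1)).permutations.map
        (chainC suf (seg.getD j ""))) ≠ [] := by
      simp only [ne_eq, List.map_eq_nil_iff]; exact permutations_ne_nil _
    rcases List.mem_map.mp (pyMin_mem _ hne') with ⟨p', hp', hpv⟩
    refine ⟨adjR (pre ++ (seg.getD j "" :: p') ++ suf), Or.inr ?_, ?_⟩
    · refine List.mem_map.mpr ⟨seg.getD j "" :: p', ?_, rfl⟩
      exact List.mem_permutations.mpr
        (((List.mem_permutations.mp hp').cons _).trans (perm_cons_take_drop seg j hj "").symm)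
    · rw [adjR_split, ← hpv]
  · intro v hv
    rcases hv with rfl | hv
    · exact ⟨1000000, Or.inl rfl, le_refl _⟩
    rcases List.mem_map.mp hv with ⟨p, hp, rfl⟩
    rcases perms_decomp seg p (by intro h; rw [h] at hm; cases hm)
      (List.mem_permutations.mp hp) with ⟨j, hj, q, rfl, hq⟩
    refine ⟨adjR pre + adjR suf + lastJ pre (seg.getD j "") +
      pyMin ((seg.take j ++ seg.drop (j + 1)).permutations.map (chainC suf (seg.getD j ""))),
      Or.inr (List.mem_map.mpr ⟨j, List.mem_range.mpr hj, rfl⟩), ?_⟩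
    rw [adjR_split]
    refine Int.add_le_add_left (pyMin_le_mem _ _ ?_) _
    exact List.mem_map.mpr ⟨q, List.mem_permutations.mpr hq, rfl⟩

theorem length_swpd (l : List String) (k i : Int) : (swpd l k i).length = l.length := by
  simp [swpd]

theorem pySwap_some (l : List String) (k i : Int) (h0k : 0 ≤ k) (hk : k < (l.length : Int))
    (h0i : 0 ≤ i) (hi : i < (l.length : Int)) : pySwap l k i = some (swpd l k i) := by
  rw [pySwap, PySem.List.pyGet?_eq_some_getElem l h0i hi, PySem.List.pyGet?_eq_some_getElem l h0k hk]
  simp only [swpd, PySem.List.pySetD_of_nonneg _ _ h0k]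
  rw [PySem.List.pySetD_of_nonneg _ _ h0i]
  rw [List.getD_eq_getElem l "" (by omega), List.getD_eq_getElem l "" (by omega)]

theorem swpd_swpd (l : List String) (k i : Int) (h0k : 0 ≤ k) (hk : k < (l.length : Int))
    (_h0i : 0 ≤ i) (hi : i < (l.length : Int)) : swpd (swpd l k i) k i = l := by
  have hkN : k.toNat < l.length := by omega
  have hiN : i.toNat < l.length := by omega
  apply List.ext_getElem (by simp [swpd])
  intro n h1 h2
  simp only [swpd, List.getD_eq_getElem?_getD, List.getElem?_set, List.getElem_set,
    List.length_set]
  split_ifs <;> simp_all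

theorem cons_getD {α : Type} (l : List α) (d : α) (h : l ≠ []) : l = l.getD 0 d :: l.drop 1 := by
  cases l with
  | nil => exact absurd rfl h
  | cons a t => simp

theorem app_getD {α : Type} (A B : List α) (j : Nat) (d : α) :
    (A ++ B).getD (A.length + j) d = B.getD j d := by
  simp [List.getD_eq_getElem?_getD, List.getElem?_append_right (Nat.le_add_right A.length j)]

theorem app_getD_left {α : Type} (A B : List α) (j : Nat) (d : α) (hj : j < A.length) :
    (A ++ B).getD j d = A.getD j d := by
  simp [List.getD_eq_getElem?_getD, List.getElem?_append_left hj]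

theorem set_in_middle {α : Type} (A B C : List α) (p : Nat) (v : α) (hp : p < B.length) :
    (A ++ (B ++ C)).set (A.length + p) v = A ++ ((B.set p v) ++ C) := by
  rw [List.set_append, if_neg (by omega), Nat.add_sub_cancel_left, List.set_append, if_pos hp]

theorem drop_app {α : Type} (A B : List α) (i : Nat) : (A ++ B).drop (A.length + i) = B.drop i := by
  rw [List.drop_append, List.drop_eq_nil_of_le (Nat.le_add_right _ _), List.nil_append,
    Nat.add_sub_cancel_left]

theorem swpd_decomp (used : List String) (k idx r : Int) (h0 : 0 ≤ k) (hki : k ≤ idx)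
    (hir : idx ≤ r) (hr : r < (used.length : Int)) :
    ∃ sw : List String,
      swpd used k idx = used.take k.toNat ++ sw ++ used.drop (r.toNat + 1) ∧
      sw.Perm ((used.drop k.toNat).take (r.toNat + 1 - k.toNat)) ∧
      sw = ((used.drop k.toNat).take (r.toNat + 1 - k.toNat)).getD (idx.toNat - k.toNat) "" ::
        sw.drop 1 ∧
      sw.length = r.toNat + 1 - k.toNat := by
  set kN := k.toNat with hkN'
  set iN := idx.toNat with hiN'
  set m := r.toNat + 1 - kN with hm'
  set j := iN - kN with hj'
  set pre := used.take kN with hpre'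
  set seg := (used.drop kN).take m with hseg'
  set suf := used.drop (r.toNat + 1) with hsuf'
  have hn : r.toNat < used.length := by omega
  have hseglen : seg.length = m := by
    rw [hseg']; simp only [List.length_take, List.length_drop]; omega
  have hprelen : pre.length = kN := by
    rw [hpre']; simp only [List.length_take]; omega
  have hjm : j < m := by omega
  have h0m : 0 < m := by omega
  have hused : used = pre ++ (seg ++ suf) := by
    have h3 : (used.drop kN).drop m = suf := by
      rw [List.drop_drop]; rw [hsuf']; congr 1; omega
    rw [hpre', hseg']
    conv_lhs => rw [← List.take_append_drop kN used]
    congr 1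
    conv_lhs => rw [← List.take_append_drop m (used.drop kN)]
    rw [h3]
  refine ⟨(seg.set 0 (seg.getD j "")).set j (seg.getD 0 ""), ?_, ?_, ?_, ?_⟩
  · rw [swpd, ← hkN', ← hiN']
    have hiNeq : iN = kN + j := by omega
    have hg1 : used.getD iN "" = seg.getD j "" := by
      conv_lhs => rw [hused, show iN = pre.length + j from by omega]
      rw [app_getD, app_getD_left _ _ _ _ (by simp only [hseglen]; omega)]
    have hg2 : used.getD kN "" = seg.getD 0 "" := by
      conv_lhs => rw [hused, show kN = pre.length + 0 from by omega]
      rw [app_getD, app_getD_left _ _ _ _ (by simp only [hseglen]; omega)]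
    rw [hg1, hg2]
    conv_lhs => rw [hused, show kN = pre.length + 0 from by omega]
    rw [set_in_middle pre seg suf 0 _ (by simp only [hseglen]; omega)]
    rw [show iN = pre.length + j from by omega,
      set_in_middle pre _ suf j _ (by simp only [List.length_set, hseglen]; omega)]
    rw [← List.append_assoc]
  · have hjseg : j < seg.length := by omega
    have h0seg : 0 < seg.length := by omega
    rw [List.getD_eq_getElem seg "" hjseg, List.getD_eq_getElem seg "" h0seg]
    exact setSet_perm seg 0 j h0seg hjseg
  · have hlen : ((seg.set 0 (seg.getD j "")).set j (seg.getD 0 "")).length = m := by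
      simp [hseglen]
    have hne : (seg.set 0 (seg.getD j "")).set j (seg.getD 0 "") ≠ [] := by
      intro hh; rw [hh] at hlen; simp at hlen; omega
    have h0seg : 0 < seg.length := by omega
    have hhead : ((seg.set 0 (seg.getD j "")).set j (seg.getD 0 "")).getD 0 "" = seg.getD j "" := by
      by_cases hj0 : j = 0
      · rw [hj0]
        simp only [List.getD_eq_getElem?_getD, List.getElem?_set, List.length_set]
        simp [h0seg]
      · simp only [List.getD_eq_getElem?_getD, List.getElem?_set, List.length_set]
        rw [if_neg hj0]
        simp [h0seg]
    conv_lhs => rw [cons_getD _ "" hne]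
    rw [hhead]
  · simp [hseglen]

theorem loop_eq : ∀ (M : Nat) (used : List String) (k r i res : Int), 0 ≤ k → k < r →
    r < (used.length : Int) → k ≤ i → (r + 1 - i).toNat = M →
    solveLoop used k r i res =
      ((PySem.List.pyRange i (r + 1) 1).map
        (fun idx => solve (swpd used k idx) (k + 1) r)).foldl min res := by
  intro M
  induction M with
  | zero =>
    intro used k r i res h0 hkr hr hki hM
    rw [solveLoop.eq_def, dif_neg (by omega : ¬(k ≤ i ∧ i < r + 1)),
      PySem.List.pyRange_one_eq_nil (by omega)]
    simp
  | succ M ih =>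
    intro used k r i res h0 hkr hr hki hM
    have hirange : i < r + 1 := by omega
    rw [solveLoop.eq_def, dif_pos ⟨hki, hirange⟩,
      pySwap_some used k i h0 (by omega) (by omega) (by omega)]
    dsimp only
    rw [pySwap_some (swpd used k i) k i h0 (by rw [length_swpd]; omega) (by omega)
        (by rw [length_swpd]; omega)]
    dsimp only
    rw [swpd_swpd used k i h0 (by omega) (by omega) (by omega),
      ih used k r (i + 1) _ h0 hkr hr (by omega) (by omega),
      PySem.List.pyRange_one_cons hirange]
    simp

theorem Achar : ∀ (N : Nat) (used : List String) (k r : Int), 0 ≤ k → k ≤ r →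
    r < (used.length : Int) → (r - k).toNat = N →
    min 1000000 (solve used k r) =
      canon (used.take k.toNat) ((used.drop k.toNat).take (r.toNat + 1 - k.toNat))
        (used.drop (r.toNat + 1))
    ∧ (k < r → solve used k r =
      canon (used.take k.toNat) ((used.drop k.toNat).take (r.toNat + 1 - k.toNat))
        (used.drop (r.toNat + 1))) := by
  intro N
  induction N using Nat.strong_induction_on with
  | _ N IH =>
  intro used k r h0 hkr hr hN
  have hsl : ((used.drop k.toNat).take (r.toNat + 1 - k.toNat)).length = r.toNat + 1 - k.toNat := by
    simp only [List.length_take, List.length_drop]; omega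
  by_cases hkreq : k = r
  · subst hkreq
    have hkN : k.toNat < used.length := by omega
    constructor
    · rw [solve.eq_def, if_pos rfl, totalCost_eq_adjR]
      have hseg : (used.drop k.toNat).take (k.toNat + 1 - k.toNat) = [used[k.toNat]] := by
        rw [show k.toNat + 1 - k.toNat = 1 from by omega, List.drop_eq_getElem_cons hkN]
        rfl
      have hdec : used.take k.toNat ++ [used[k.toNat]] ++ used.drop (k.toNat + 1) = used := by
        rw [List.append_assoc, show [used[k.toNat]] ++ used.drop (k.toNat + 1)
            = used[k.toNat] :: used.drop (k.toNat + 1) from rfl,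
          ← List.drop_eq_getElem_cons hkN, List.take_append_drop]
      rw [hseg, canon]
      have heq : (([used[k.toNat]] : List String).permutations.map
          (fun p => adjR (used.take k.toNat ++ p ++ used.drop (k.toNat + 1)))).foldl min 1000000
          = ([adjR used] : List Int).foldl min 1000000 := by
        apply foldlmin_eq_of_dom
        · intro v hv
          rcases hv with rfl | hv
          · exact ⟨1000000, Or.inl rfl, le_refl _⟩
          rcases List.mem_map.mp hv with ⟨p, hp, rfl⟩
          rw [List.perm_singleton.mp (List.mem_permutations.mp hp), hdec]
          exact ⟨adjR used, Or.inr (List.mem_singleton.mpr rfl), le_refl _⟩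
        · intro v hv
          rcases hv with rfl | hv
          · exact ⟨1000000, Or.inl rfl, le_refl _⟩
          rw [List.mem_singleton.mp hv]
          refine ⟨adjR (used.take k.toNat ++ [used[k.toNat]] ++ used.drop (k.toNat + 1)),
            Or.inr ?_, by rw [hdec]⟩
          exact List.mem_map.mpr ⟨[used[k.toNat]],
            List.mem_permutations.mpr (List.Perm.refl _), rfl⟩
      rw [heq]
      simp
    · intro hklt; omega
  · have hklt : k < r := lt_of_le_of_ne hkr hkreq
    have hsegne : (used.drop k.toNat).take (r.toNat + 1 - k.toNat) ≠ [] := by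
      intro hh; rw [hh] at hsl; simp at hsl; omega
    have main : solve used k r =
        canon (used.take k.toNat) ((used.drop k.toNat).take (r.toNat + 1 - k.toNat))
          (used.drop (r.toNat + 1)) := by
      rw [solve.eq_def, if_neg hkreq,
        loop_eq (r + 1 - k).toNat used k r k 1000000 h0 hklt hr (le_refl k) rfl, canon]
      have hprelen : (used.take k.toNat).length = k.toNat := by
        simp only [List.length_take]; omega
      -- shape of the recursive call's canon, for any idx in the loop range
      have hIHidx : ∀ idx : Int, k ≤ idx → idx ≤ r →
          ∃ sw : List String,
            sw.Perm ((used.drop k.toNat).take (r.toNat + 1 - k.toNat)) ∧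
            sw = ((used.drop k.toNat).take (r.toNat + 1 - k.toNat)).getD (idx.toNat - k.toNat) ""
              :: sw.drop 1 ∧
            min 1000000 (solve (swpd used k idx) (k + 1) r) =
              ((sw.drop 1).permutations.map (fun p => adjR ((used.take k.toNat ++
                [((used.drop k.toNat).take (r.toNat + 1 - k.toNat)).getD (idx.toNat - k.toNat) ""])
                ++ p ++ used.drop (r.toNat + 1)))).foldl min 1000000 := by
        intro idx hk_le hidxr
        rcases swpd_decomp used k idx r h0 hk_le hidxr hr with ⟨sw, hA, hB, hC, hD⟩
        have hlen' : (swpd used k idx).length = used.length := length_swpd used k idx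
        have hk1 : (k + 1).toNat = k.toNat + 1 := by omega
        have hIH := (IH (r - (k + 1)).toNat (by omega) (swpd used k idx) (k + 1) r (by omega)
          (by omega) (by rw [hlen']; exact hr) rfl).1
        have hpre' : (swpd used k idx).take (k + 1).toNat = used.take k.toNat ++
            [((used.drop k.toNat).take (r.toNat + 1 - k.toNat)).getD (idx.toNat - k.toNat) ""] := by
          rw [hA, hk1, List.append_assoc, show k.toNat + 1 = (used.take k.toNat).length + 1 from by
            rw [hprelen], List.take_append, List.take_of_length_le (by omega),
            Nat.add_sub_cancel_left]
          congr 1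
          conv_lhs => rw [hC]
          simp
        have hseg' : ((swpd used k idx).drop (k + 1).toNat).take (r.toNat + 1 - (k + 1).toNat)
            = sw.drop 1 := by
          have e1 : List.drop (k.toNat + 1) (used.take k.toNat ++ (sw ++ used.drop (r.toNat + 1)))
              = List.drop 1 (sw ++ used.drop (r.toNat + 1)) := by
            rw [show k.toNat + 1 = (used.take k.toNat).length + 1 from by rw [hprelen], drop_app]
          rw [hA, hk1, List.append_assoc, e1, List.drop_append,
            show 1 - sw.length = 0 from by omega, List.drop_zero,
            show r.toNat + 1 - (k.toNat + 1) = (sw.drop 1).length from by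
              simp only [List.length_drop, hD]; omega, List.take_left]
        have hsuf' : (swpd used k idx).drop (r.toNat + 1) = used.drop (r.toNat + 1) := by
          rw [hA, show r.toNat + 1 = (used.take k.toNat ++ sw).length from by
            simp only [List.length_append, hprelen, hD]; omega, List.drop_left]
        rw [hpre', hseg', hsuf'] at hIH
        rw [canon] at hIH
        exact ⟨sw, hB, hC, hIH⟩
      apply foldlmin_eq_of_dom
      · intro v hv
        rcases hv with rfl | hv
        · exact ⟨1000000, Or.inl rfl, le_refl _⟩
        rcases List.mem_map.mp hv with ⟨idx, hidx, rfl⟩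
        rcases PySem.List.mem_pyRange_one.mp hidx with ⟨hk_le, hlt⟩
        rcases hIHidx idx hk_le (by omega) with ⟨sw, hB, hC, hIH⟩
        rcases PySem.List.foldl_min_mem ((sw.drop 1).permutations.map (fun p => adjR ((used.take
            k.toNat ++ [((used.drop k.toNat).take (r.toNat + 1 - k.toNat)).getD
            (idx.toNat - k.toNat) ""]) ++ p ++ used.drop (r.toNat + 1)))) 1000000 with hcase | hcase
        · refine ⟨1000000, Or.inl rfl, ?_⟩
          rw [hcase] at hIH
          omega
        · rcases List.mem_map.mp hcase with ⟨p', hp', hval⟩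
          refine ⟨adjR (used.take k.toNat ++
            (((used.drop k.toNat).take (r.toNat + 1 - k.toNat)).getD (idx.toNat - k.toNat) "" :: p')
            ++ used.drop (r.toNat + 1)), Or.inr ?_, ?_⟩
          · refine List.mem_map.mpr ⟨_, ?_, rfl⟩
            refine List.mem_permutations.mpr ?_
            exact (List.Perm.cons _ (List.mem_permutations.mp hp')).trans (hC ▸ hB)
          · have : adjR (used.take k.toNat ++
                (((used.drop k.toNat).take (r.toNat + 1 - k.toNat)).getD (idx.toNat - k.toNat) ""
                :: p') ++ used.drop (r.toNat + 1)) = adjR ((used.take k.toNat ++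
                [((used.drop k.toNat).take (r.toNat + 1 - k.toNat)).getD (idx.toNat - k.toNat) ""])
                ++ p' ++ used.drop (r.toNat + 1)) := by
              congr 1
              simp
            rw [this, hval, ← hIH]
            omega
      · intro v hv
        rcases hv with rfl | hv
        · exact ⟨1000000, Or.inl rfl, le_refl _⟩
        rcases List.mem_map.mp hv with ⟨p, hp, rfl⟩
        rcases perms_decomp _ p hsegne (List.mem_permutations.mp hp) with ⟨j, hj, q, rfl, hq⟩
        have hjlt : (j : Int) < r + 1 - k := by
          rw [hsl] at hj; omega
        rcases hIHidx (k + (j : Int)) (by omega) (by omega) with ⟨sw, hB, hC, hIH⟩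
        have hjj : (k + (j : Int)).toNat - k.toNat = j := by omega
        rw [hjj] at hC hIH
        have hqsw : q.Perm (sw.drop 1) := by
          have h1 : ((used.drop k.toNat).take (r.toNat + 1 - k.toNat)).Perm
              (((used.drop k.toNat).take (r.toNat + 1 - k.toNat)).getD j "" ::
                ((used.drop k.toNat).take (r.toNat + 1 - k.toNat)).take j ++
                ((used.drop k.toNat).take (r.toNat + 1 - k.toNat)).drop (j + 1)) := by
            exact perm_cons_take_drop _ j hj ""
          have h2 := (h1.symm.trans (hC ▸ hB).symm)
          exact hq.trans (List.Perm.cons_inv h2)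
        have hle : ((sw.drop 1).permutations.map (fun p => adjR ((used.take k.toNat ++
            [((used.drop k.toNat).take (r.toNat + 1 - k.toNat)).getD j ""])
            ++ p ++ used.drop (r.toNat + 1)))).foldl min 1000000 ≤
            adjR (used.take k.toNat ++
              (((used.drop k.toNat).take (r.toNat + 1 - k.toNat)).getD j "" :: q)
              ++ used.drop (r.toNat + 1)) := by
          have hmem : adjR ((used.take k.toNat ++
              [((used.drop k.toNat).take (r.toNat + 1 - k.toNat)).getD j ""])
              ++ q ++ used.drop (r.toNat + 1)) ∈
              ((sw.drop 1).permutations.map (fun p => adjR ((used.take k.toNat ++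
              [((used.drop k.toNat).take (r.toNat + 1 - k.toNat)).getD j ""])
              ++ p ++ used.drop (r.toNat + 1)))) :=
            List.mem_map.mpr ⟨q, List.mem_permutations.mpr hqsw, rfl⟩
          have := (PySem.List.foldl_min_le _ (1000000 : Int)).2 _ hmem
          refine le_trans this (le_of_eq ?_)
          congr 1
          simp
        rw [← hIH] at hle
        by_cases ht : solve (swpd used k (k + (j : Int))) (k + 1) r ≤ 1000000
        · refine ⟨solve (swpd used k (k + (j : Int))) (k + 1) r, Or.inr ?_, by omega⟩
          exact List.mem_map.mpr ⟨k + (j : Int), PySem.List.mem_pyRange_one.mpr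
            ⟨by omega, by omega⟩, rfl⟩
        · exact ⟨1000000, Or.inl rfl, by omega⟩
    constructor
    · rw [main]
      have hc : canon (used.take k.toNat) ((used.drop k.toNat).take (r.toNat + 1 - k.toNat))
          (used.drop (r.toNat + 1)) ≤ 1000000 := by
        rw [canon]; exact (PySem.List.foldl_min_le _ _).1
      omega
    · intro _; exact main

-- ===== VERDICT (by name: the statement is the Claim_ definition above) =====
theorem solve_spec : Claim_equal_solve := by
  intro used k r _ hpre
  show solve used k r = solve_alt used k r
  rcases hpre with hkr | ⟨h0, hkr, hr⟩ | hrk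
  · subst hkr
    rw [solve.eq_def, if_pos rfl, solve_alt, if_pos rfl, totalCost_eq_adjR, adjSum_eq_adjR]
  · by_cases hkreq : k = r
    · subst hkreq
      rw [solve.eq_def, if_pos rfl, solve_alt, if_pos rfl, totalCost_eq_adjR, adjSum_eq_adjR]
    · have hklt : k < r := lt_of_le_of_ne hkr hkreq
      rw [(Achar (r - k).toNat used k r h0 hkr hr rfl).2 hklt, Bchar used k r h0 hkr hr hkreq]
  · rename_i hrk
    rcases hrk with ⟨hrk, hcl⟩
    have hkreq : k ≠ r := by omega
    have hseg0 : PySem.List.slice used (some k) (some (r + 1)) = [] := by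
      apply List.eq_nil_of_length_eq_zero
      rw [PySem.List.length_slice]
      omega
    rw [solve.eq_def, if_neg hkreq, solveLoop.eq_def, dif_neg (by omega : ¬(k ≤ k ∧ k < r + 1)),
      solve_alt, if_neg hkreq, hseg0]
    simp
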